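-- pv_equiv track=rewrite | github.com/mijahauan/Arisbe | src/clif_generator.py | _format_clif
-- ===== SOURCE A (Python) =====
-- def _format_clif(clif_text: str) -> str:
--     """Format CLIF text for readability."""
--     if not clif_text:
--         return clif_text
--
--     # Simple formatting: add newlines and indentation
--     lines = []
--     current_line = ""
--     indent_level = 0
--
--     i = 0
--     while i < len(clif_text):
--         char = clif_text[i]
--
--         if char == '(':
--             if current_line.strip():
--                 lines.append("  " * indent_level + current_line.strip())
--                 current_line = ""
--
--             current_line += char
--
--             # Look ahead to see if this is a simple predicate
--             j = i + 1
--             paren_count = 1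
--             is_simple = True
--
--             while j < len(clif_text) and paren_count > 0:
--                 if clif_text[j] == '(':
--                     paren_count += 1
--                     if paren_count > 1:
--                         is_simple = False
--                 elif clif_text[j] == ')':
--                     paren_count -= 1
--                 j += 1
--
--             if not is_simple:
--                 lines.append("  " * indent_level + current_line.strip())
--                 current_line = ""
--                 indent_level += 1
--
--         elif char == ')':
--             current_line += char
--
--             # Check if this closes a complex expression
--             if current_line.count('(') != current_line.count(')'):
--                 indent_level = max(0, indent_level - 1)
--                 lines.append("  " * indent_level + current_line.strip())
--                 current_line = ""
--
--         elif char == ' ' and current_line.strip():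
--             current_line += char
--
--         elif char not in [' ', '\n', '\t']:
--             current_line += char
--
--         i += 1
--
--     if current_line.strip():
--         lines.append("  " * indent_level + current_line.strip())
--
--     return "\n".join(lines)
-- ===== SOURCE B (Python) =====
-- def _format_clif(clif_text: str) -> str:
--     """Format CLIF text for readability (single pass)."""
--     if not clif_text:
--         return clif_text
--
--     n = len(clif_text)
--     # Backward pass: simple[i] (for positions holding '(') is True unless the
--     # nearest paren character to the right of i is another '('.
--     simple = [False] * n
--     nxt = None  # nearest paren char seen so far scanning from the right
--     for i in range(n - 1, -1, -1):
--         ch = clif_text[i]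
--         if ch == '(':
--             simple[i] = nxt != '('
--             nxt = '('
--         elif ch == ')':
--             nxt = ')'
--
--     lines = []
--     cur = []            # characters of the current line
--     has_text = False    # does cur contain a non-whitespace character?
--     opens = 0           # count of '(' in cur
--     closes = 0          # count of ')' in cur
--     indent = 0
--
--     def emit(level):
--         lines.append("  " * level + "".join(cur).strip())
--
--     for i in range(n):
--         ch = clif_text[i]
--         if ch == '(':
--             if has_text:
--                 emit(indent)
--                 cur = []
--                 opens = closes = 0
--             cur.append(ch)
--             has_text = True
--             opens += 1
--             if not simple[i]:
--                 emit(indent)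
--                 cur = []
--                 has_text = False
--                 opens = closes = 0
--                 indent += 1
--         elif ch == ')':
--             cur.append(ch)
--             has_text = True
--             closes += 1
--             if opens != closes:
--                 indent = max(0, indent - 1)
--                 emit(indent)
--                 cur = []
--                 has_text = False
--                 opens = closes = 0
--         elif ch == ' ':
--             if has_text:
--                 cur.append(ch)
--         elif ch not in ('\n', '\t'):
--             cur.append(ch)
--             if not ch.isspace():
--                 has_text = True
--
--     if has_text:
--         emit(indent)
--
--     return "\n".join(lines)
-- ===== Notes on version B (the rewrite author's own statement) =====
-- stated objective: faster
-- what changed: Replaces the per-open-paren look-ahead scan and per-close-paren full-line count rescans of A with one backward pass precomputing each open paren's simple-flag (whether the nearest paren character to its right is another open paren) plus incremental open/close/has-text counters on the current line, making the formatter a single O(n) pass.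
import Mathlib
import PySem

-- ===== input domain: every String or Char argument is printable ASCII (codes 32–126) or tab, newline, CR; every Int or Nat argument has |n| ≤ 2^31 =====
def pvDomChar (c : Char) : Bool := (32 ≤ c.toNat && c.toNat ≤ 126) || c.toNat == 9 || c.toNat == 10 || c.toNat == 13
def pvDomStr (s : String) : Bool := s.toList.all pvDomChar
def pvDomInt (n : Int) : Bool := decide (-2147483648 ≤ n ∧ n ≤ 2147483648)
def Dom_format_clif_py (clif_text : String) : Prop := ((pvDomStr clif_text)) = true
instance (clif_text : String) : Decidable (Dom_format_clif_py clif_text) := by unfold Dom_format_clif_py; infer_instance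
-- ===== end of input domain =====

-- B replaces the per-open-paren look-ahead scan and per-close-paren full-line count rescans of A
-- with a precomputed next-paren flag (one backward pass) and incremental line counters (faster: one pass).

-- shared literal helper: "  " * n
def pvPad : Nat → List Char
  | 0 => []
  | n + 1 => ' ' :: ' ' :: pvPad n

-- ===== PORT A =====
-- A's look-ahead: while j < len and paren_count > 0 (j ranges over `rest`)
def pvLookA : List Char → Int → Bool → Bool
  | [], _, simple => simple
  | c :: rest, pc, simple =>
    if pc > 0 then
      if c = '(' then pvLookA rest (pc + 1) (if pc + 1 > 1 then false else simple)
      else if c = ')' then pvLookA rest (pc - 1) simple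
      else pvLookA rest pc simple
    else simple

-- A's main while loop over the characters (cur = current_line, as List Char)
def pvLoopA : List Char → List Char → Nat → List (List Char) → List (List Char)
  | [], cur, indent, lines =>
      if PySem.Chars.strip cur ≠ [] then lines ++ [pvPad indent ++ PySem.Chars.strip cur] else lines
  | c :: rest, cur, indent, lines =>
    if c = '(' then
      let lines1 := if PySem.Chars.strip cur ≠ [] then lines ++ [pvPad indent ++ PySem.Chars.strip cur] else lines
      let cur1 := (if PySem.Chars.strip cur ≠ [] then [] else cur) ++ [c]
      if pvLookA rest 1 true then pvLoopA rest cur1 indent lines1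
      else pvLoopA rest [] (indent + 1) (lines1 ++ [pvPad indent ++ PySem.Chars.strip cur1])
    else if c = ')' then
      let cur1 := cur ++ [c]
      if PySem.Chars.count cur1 ['('] ≠ PySem.Chars.count cur1 [')'] then
        pvLoopA rest [] (indent - 1) (lines ++ [pvPad (indent - 1) ++ PySem.Chars.strip cur1])
      else pvLoopA rest cur1 indent lines
    else if c = ' ' then
      if PySem.Chars.strip cur ≠ [] then pvLoopA rest (cur ++ [c]) indent lines
      else pvLoopA rest cur indent lines
    else if c = '\n' ∨ c = '\t' then pvLoopA rest cur indent lines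
    else pvLoopA rest (cur ++ [c]) indent lines

def format_clif_py (clif_text : String) : String :=
  if clif_text.toList = [] then clif_text
  else String.ofList (PySem.Chars.join ['\n'] (pvLoopA clif_text.toList [] 0 []))

-- ===== PORT B =====
-- B's backward pass: returns (nearest paren char to the right, chars zipped with their simple-flag)
def pvScanB : List Char → Option Char × List (Char × Bool)
  | [] => (none, [])
  | c :: rest =>
    let p := pvScanB rest
    if c = '(' then (some '(', (c, decide (p.1 ≠ some '(')) :: p.2)
    else if c = ')' then (some ')', (c, false) :: p.2)
    else (p.1, (c, false) :: p.2)

-- B's emit helper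
def pvEmitB (lines : List (List Char)) (level : Nat) (cur : List Char) : List (List Char) :=
  lines ++ [pvPad level ++ PySem.Chars.strip cur]

-- B's single forward pass with incremental state (hasText, opens, closes)
def pvLoopB : List (Char × Bool) → List Char → Bool → Nat → Nat → Nat → List (List Char) → List (List Char)
  | [], cur, hasText, _, _, indent, lines => if hasText then pvEmitB lines indent cur else lines
  | (c, simple) :: rest, cur, hasText, opens, closes, indent, lines =>
    if c = '(' then
      let lines1 := if hasText then pvEmitB lines indent cur else lines
      let cur1 := (if hasText then [] else cur) ++ [c]
      let opens1 := (if hasText then 0 else opens) + 1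
      let closes1 := if hasText then 0 else closes
      if simple then pvLoopB rest cur1 true opens1 closes1 indent lines1
      else pvLoopB rest [] false 0 0 (indent + 1) (pvEmitB lines1 indent cur1)
    else if c = ')' then
      if opens ≠ closes + 1 then
        pvLoopB rest [] false 0 0 (indent - 1) (pvEmitB lines (indent - 1) (cur ++ [c]))
      else pvLoopB rest (cur ++ [c]) true opens (closes + 1) indent lines
    else if c = ' ' then
      if hasText then pvLoopB rest (cur ++ [c]) hasText opens closes indent lines
      else pvLoopB rest cur hasText opens closes indent lines
    else if c = '\n' ∨ c = '\t' then pvLoopB rest cur hasText opens closes indent lines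
    else pvLoopB rest (cur ++ [c]) (hasText || !PySem.Chars.isspace c) opens closes indent lines

def format_clif_py_alt (clif_text : String) : String :=
  if clif_text.toList = [] then clif_text
  else String.ofList (PySem.Chars.join ['\n'] (pvLoopB (pvScanB clif_text.toList).2 [] false 0 0 0 []))

-- ===== PRECONDITION & SPEC =====
def Spec_format_clif_py (clif_text : String) (out : String) : Prop := out = format_clif_py_alt clif_text
instance (clif_text : String) (out : String) : Decidable (Spec_format_clif_py clif_text out) := by unfold Spec_format_clif_py; infer_instance

-- ===== CLAIM (what is proved, stated in full; the proofs are below) =====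
def Claim_equal_format_clif_py : Prop := ∀ (clif_text : String), Dom_format_clif_py clif_text → Spec_format_clif_py clif_text (format_clif_py clif_text)

-- ===== LEMMAS AND PROOFS =====

-- A's look-ahead never recovers once is_simple is false
lemma pvLookA_false (l : List Char) (pc : Int) : pvLookA l pc false = false := by
  induction l generalizing pc with
  | nil => rfl
  | cons c rest ih => simp only [pvLookA]; split_ifs <;> simp [ih]

lemma pvLookA_zero (l : List Char) (s : Bool) : pvLookA l 0 s = s := by
  cases l <;> simp [pvLookA]

-- A's look-ahead from depth 1 = "the next paren char is not '('" (= B's precomputed flag)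
lemma pvLookA_eq_flag (l : List Char) : pvLookA l 1 true = decide ((pvScanB l).1 ≠ some '(') := by
  induction l with
  | nil => rfl
  | cons c rest ih =>
    by_cases h1 : c = '('
    · simp [pvLookA, pvScanB, h1, pvLookA_false]
    · by_cases h2 : c = ')'
      · simp [pvLookA, pvScanB, h2, pvLookA_zero]
      · simpa [pvLookA, pvScanB, h1, h2] using ih

-- strip is empty iff the string has no non-whitespace character
lemma strip_ne_nil_iff (cs : List Char) :
    PySem.Chars.strip cs ≠ [] ↔ cs.any (fun c => !PySem.Chars.isspace c) = true := by
  unfold PySem.Chars.strip PySem.Chars.rstrip PySem.Chars.lstrip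
  constructor
  · intro h
    by_contra hall
    simp only [List.any_eq_true, not_exists, not_and, Bool.not_eq_true', Bool.not_eq_false] at hall
    apply h
    have h1 : List.dropWhile PySem.Chars.isspace cs = [] := by
      rw [List.dropWhile_eq_nil_iff]; intro c hc; exact hall c hc
    simp [h1]
  · intro h hnil
    simp only [List.any_eq_true] at h
    obtain ⟨c, hc, hws⟩ := h
    rw [List.reverse_eq_nil_iff, List.dropWhile_eq_nil_iff] at hnil
    have hmem : c ∈ (List.dropWhile PySem.Chars.isspace cs).reverse ∨ PySem.Chars.isspace c = true := by
      by_cases hm : c ∈ List.dropWhile PySem.Chars.isspace cs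
      · exact Or.inl (List.mem_reverse.mpr hm)
      · right
        have := List.takeWhile_append_dropWhile (p := PySem.Chars.isspace) (l := cs)
        rw [← this] at hc
        rcases List.mem_append.mp hc with h' | h'
        · exact List.mem_takeWhile_imp h'
        · exact absurd h' hm
    rcases hmem with hm | hws'
    · have := hnil c hm
      simp [this] at hws
    · simp [hws'] at hws

-- single-character substring count = element count
lemma count_go_single (c : Char) (l : List Char) (acc fuel : Nat) (h : l.length ≤ fuel) :
    PySem.Chars.count.go [c] fuel l acc = acc + l.count c := by
  induction l generalizing acc fuel with
  | nil => cases fuel <;> simp [PySem.Chars.count.go]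
  | cons d rest ih =>
    cases fuel with
    | zero => simp at h
    | succ n =>
      have hn : rest.length ≤ n := by simp at h; omega
      by_cases hd : c = d
      · subst hd
        have hp : List.isPrefixOf [c] (c :: rest) = true := by simp [List.isPrefixOf]
        simp only [PySem.Chars.count.go, hp, if_true, List.length_cons, List.length_nil,
          List.drop_succ_cons, List.drop_zero]
        rw [ih _ _ hn]
        simp
        omega
      · have hp : List.isPrefixOf [c] (d :: rest) = false := by
          simp [List.isPrefixOf]; exact hd
        simp only [PySem.Chars.count.go, hp, Bool.false_eq_true, if_false]
        rw [ih _ _ hn]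
        simp [Ne.symm hd]

lemma chars_count_single (cs : List Char) (c : Char) : PySem.Chars.count cs [c] = cs.count c := by
  unfold PySem.Chars.count
  simp [count_go_single c cs 0 cs.length le_rfl]

lemma strip_eq_nil_of (cs : List Char) (h : cs.any (fun c => !PySem.Chars.isspace c) = false) :
    PySem.Chars.strip cs = [] := by
  by_contra hn
  exact absurd ((strip_ne_nil_iff cs).mp hn) (by simp [h])

-- main loop invariant: A's loop equals B's loop when B's cached state matches cur
lemma loop_eq (rest : List Char) : ∀ (cur : List Char) (indent : Nat) (lines : List (List Char)),
    pvLoopA rest cur indent lines =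
      pvLoopB (pvScanB rest).2 cur (cur.any (fun c => !PySem.Chars.isspace c))
        (cur.count '(') (cur.count ')') indent lines := by
  induction rest with
  | nil =>
    intro cur indent lines
    simp only [pvScanB, pvLoopA, pvLoopB, pvEmitB]
    by_cases hT : cur.any (fun c => !PySem.Chars.isspace c) = true
    · have hst : PySem.Chars.strip cur ≠ [] := (strip_ne_nil_iff cur).mpr hT
      simp [hT, hst]
    · simp only [Bool.not_eq_true] at hT
      have hst := strip_eq_nil_of cur hT
      simp [hT, hst]
  | cons c rest ih =>
    intro cur indent lines
    by_cases h1 : c = '('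
    · subst h1
      have hscan : (pvScanB ('(' :: rest)).2
          = ('(', decide ((pvScanB rest).1 ≠ some '(')) :: (pvScanB rest).2 := by simp [pvScanB]
      rw [hscan]
      simp only [pvLoopA, pvLoopB, pvEmitB, pvLookA_eq_flag]
      simp only [reduceIte, Char.reduceEq]
      by_cases hT : cur.any (fun c => !PySem.Chars.isspace c) = true
      · have hst : PySem.Chars.strip cur ≠ [] := (strip_ne_nil_iff cur).mpr hT
        by_cases hs : (pvScanB rest).1 = some '('
        · simp only [hT, hs, ne_eq, hst, not_false_eq_true, if_true, decide_not,
            decide_eq_true_eq, not_true, decide_false, Bool.not_false, Bool.not_true,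
            Bool.false_eq_true, if_false, if_true]
          rw [ih]
          simp [PySem.Chars.isspace]
        · simp only [hT, hs, ne_eq, hst, not_false_eq_true, if_true, decide_not,
            decide_eq_true_eq, not_false_eq_true, decide_true, Bool.not_true, Bool.not_false,
            Bool.true_eq_false, if_false, if_true]
          rw [ih]
          simp [PySem.Chars.isspace]
      · simp only [Bool.not_eq_true] at hT
        have hst := strip_eq_nil_of cur hT
        by_cases hs : (pvScanB rest).1 = some '('
        · simp only [hT, hs, hst, ne_eq, not_true, not_false_eq_true, decide_not,
            decide_eq_true_eq, decide_false, Bool.not_false, Bool.not_true, Bool.false_eq_true,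
            if_false, if_true]
          rw [ih]
          simp [hT, PySem.Chars.isspace, List.count_append, List.any_append]
        · simp only [hT, hs, hst, ne_eq, not_false_eq_true, decide_not, decide_eq_true_eq,
            decide_true, Bool.not_true, Bool.not_false, Bool.true_eq_false, Bool.false_eq_true,
            if_false, if_true]
          rw [ih]
          simp [hT, hst, PySem.Chars.isspace, List.count_append, List.any_append]
    · by_cases h2 : c = ')'
      · subst h2
        have hscan : (pvScanB (')' :: rest)).2 = (')', false) :: (pvScanB rest).2 := by
          simp [pvScanB]
        rw [hscan]
        simp only [pvLoopA, pvLoopB, pvEmitB, chars_count_single]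
        simp only [reduceIte, Char.reduceEq]
        have hco : (cur ++ [')']).count '(' = cur.count '(' := by simp
        have hcc : (cur ++ [')']).count ')' = cur.count ')' + 1 := by simp
        rw [hco, hcc]
        by_cases hne : cur.count '(' = cur.count ')' + 1
        · rw [if_neg (by omega), if_neg (by omega), ih]
          simp [List.count_append, List.any_append, PySem.Chars.isspace]
        · rw [if_pos (by omega), if_pos (by omega), ih]
          simp
      · by_cases h3 : c = ' '
        · subst h3
          have hscan : (pvScanB (' ' :: rest)).2 = (' ', false) :: (pvScanB rest).2 := by
            simp [pvScanB]
          rw [hscan]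
          simp only [pvLoopA, pvLoopB]
          simp only [reduceIte, Char.reduceEq]
          by_cases hT : cur.any (fun c => !PySem.Chars.isspace c) = true
          · have hst : PySem.Chars.strip cur ≠ [] := (strip_ne_nil_iff cur).mpr hT
            simp only [hT, ne_eq, hst, not_false_eq_true, if_true]
            rw [ih]
            simp [hT, List.count_append, List.any_append,
              show (!PySem.Chars.isspace ' ') = false from by decide]
          · simp only [Bool.not_eq_true] at hT
            have hst := strip_eq_nil_of cur hT
            simp only [hT, hst, ne_eq, not_true, not_false_eq_true, Bool.false_eq_true, if_false]
            have h := ih cur indent lines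
            rw [hT] at h
            exact h
        · by_cases h4 : c = '\n' ∨ c = '\t'
          · have hscan : (pvScanB (c :: rest)).2 = (c, false) :: (pvScanB rest).2 := by
              rcases h4 with h | h <;> subst h <;> simp [pvScanB]
            rw [hscan]
            simp only [pvLoopA, pvLoopB]
            rw [if_neg h1, if_neg h2, if_neg h3, if_pos h4, if_neg (by simp [h1]),
              if_neg (by simp [h2]), if_neg (by simp [h3]), if_pos h4]
            exact ih cur indent lines
          · have hscan : (pvScanB (c :: rest)).2 = (c, false) :: (pvScanB rest).2 := by
              simp [pvScanB, h1, h2]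
            rw [hscan]
            simp only [pvLoopA, pvLoopB]
            rw [if_neg h1, if_neg h2, if_neg h3, if_neg h4, if_neg (by simp [h1]),
              if_neg (by simp [h2]), if_neg (by simp [h3]), if_neg h4, ih]
            simp [List.count_append, List.any_append, h1, h2, Ne.symm h1, Ne.symm h2]
-- ===== VERDICT (by name: the statement is the Claim_ definition above) =====
theorem format_clif_py_spec : Claim_equal_format_clif_py := by
  intro s _
  unfold Spec_format_clif_py format_clif_py format_clif_py_alt
  by_cases h : s.toList = []
  · rw [if_pos h, if_pos h]
  · rw [if_neg h, if_neg h, loop_eq]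
    norm_num
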